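-- pv_equiv track=rewrite | github.com/ZZR8066/SEMv2 | SEMv2/libs/utils/utils.py | match_segment_spans
-- ===== SOURCE A (Python) =====
-- def match_segment_spans(segments, spans):
--     matched_segments = list()
--     matched_spans = list()
--
--     for segment_idx, segment in enumerate(segments):
--         for span_idx, span in enumerate(spans):
--             if span_idx not in matched_spans:
--                 if (segment >= span[0]) and (segment < span[1]):
--                     matched_segments.append(segment_idx)
--                     matched_spans.append(span_idx)
--
--     return matched_segments, matched_spans
-- ===== SOURCE B (Python) =====
-- def match_segment_spans(segments, spans):
--     # First pass: each span is owned by the lowest-index segment it contains, if any.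
--     owner = []
--     for span in spans:
--         o = None
--         for i, segment in enumerate(segments):
--             if span[0] <= segment < span[1]:
--                 o = i
--                 break
--         owner.append(o)
--     # Second pass: emit pairs in (segment index, span index) order.
--     matched_segments = []
--     matched_spans = []
--     for i in range(len(segments)):
--         for j, o in enumerate(owner):
--             if o == i:
--                 matched_segments.append(i)
--                 matched_spans.append(j)
--     return matched_segments, matched_spans
-- ===== Notes on version B (the rewrite author's own statement) =====
-- stated objective: faster
-- what changed: Replaces A's single interleaved scan that re-scans the growing matched_spans list on every inner step with two passes: an owner table mapping each span to the lowest-index segment containing it, then an emit pass over (segment index, owner table) producing the same pairs in the same order.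
import Mathlib
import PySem

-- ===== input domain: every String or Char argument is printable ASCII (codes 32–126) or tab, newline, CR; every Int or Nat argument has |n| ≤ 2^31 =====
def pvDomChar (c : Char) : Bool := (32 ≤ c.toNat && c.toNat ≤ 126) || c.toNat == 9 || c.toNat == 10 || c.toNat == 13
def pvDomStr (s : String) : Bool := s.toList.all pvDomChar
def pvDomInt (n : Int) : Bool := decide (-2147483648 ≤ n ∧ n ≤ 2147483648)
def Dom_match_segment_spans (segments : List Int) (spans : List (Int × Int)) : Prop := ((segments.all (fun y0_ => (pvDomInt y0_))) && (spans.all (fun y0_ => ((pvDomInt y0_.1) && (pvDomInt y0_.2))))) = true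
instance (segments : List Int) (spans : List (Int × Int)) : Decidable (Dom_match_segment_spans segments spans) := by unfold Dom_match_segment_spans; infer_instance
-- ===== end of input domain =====

-- B replaces A's stateful used-span list (re-scanned on every inner step) with a two-pass
-- owner table: first the lowest-index containing segment per span, then an emit pass.

-- ===== PORT A =====
-- inner loop: `for span_idx, span in enumerate(spans)` with the used-list test and append
def msInnerA (i : Nat) (s : Int) : Nat → List (Int × Int) → List Int × List Int → List Int × List Int
  | _, [], st => st
  | j, sp :: rest, st =>
    msInnerA i s (j+1) rest
      (if (j : Int) ∈ st.2 then st
       else if sp.1 ≤ s ∧ s < sp.2 then (st.1 ++ [(i : Int)], st.2 ++ [(j : Int)]) else st)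

-- outer loop: `for segment_idx, segment in enumerate(segments)`
def msOuterA : Nat → List Int → List (Int × Int) → List Int × List Int → List Int × List Int
  | _, [], _, st => st
  | i, s :: rest, spans, st => msOuterA (i+1) rest spans (msInnerA i s 0 spans st)

def match_segment_spans (segments : List Int) (spans : List (Int × Int)) : List Int × List Int :=
  msOuterA 0 segments spans ([], [])

-- ===== PORT B =====
-- `for i, segment in enumerate(segments): if span[0] <= segment < span[1]: o = i; break`
def ownAux (sp : Int × Int) : Nat → List Int → Option Nat
  | _, [] => none
  | i, s :: rest => if sp.1 ≤ s ∧ s < sp.2 then some i else ownAux sp (i+1) rest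

-- second pass, inner loop: `for j, o in enumerate(owner)`
def altInner (i : Nat) : Nat → List (Option Nat) → List Int × List Int → List Int × List Int
  | _, [], st => st
  | j, o :: rest, st =>
    altInner i (j+1) rest
      (if o = some i then (st.1 ++ [(i : Int)], st.2 ++ [(j : Int)]) else st)

-- second pass, outer loop: `for i in range(len(segments))`
def altOuter (owner : List (Option Nat)) : Nat → Nat → List Int × List Int → List Int × List Int
  | 0, _, st => st
  | k+1, i, st => altOuter owner k (i+1) (altInner i 0 owner st)

def match_segment_spans_alt (segments : List Int) (spans : List (Int × Int)) : List Int × List Int :=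
  let owner := spans.map (fun sp => ownAux sp 0 segments)
  altOuter owner segments.length 0 ([], [])

-- ===== PRECONDITION & SPEC =====
def Spec_match_segment_spans (segments : List Int) (spans : List (Int × Int)) (out : List Int × List Int) : Prop := out = match_segment_spans_alt segments spans
instance (segments : List Int) (spans : List (Int × Int)) (out : List Int × List Int) : Decidable (Spec_match_segment_spans segments spans out) := by unfold Spec_match_segment_spans; infer_instance

-- ===== CLAIM (what is proved, stated in full; the proofs are below) =====
def Claim_equal_match_segment_spans : Prop := ∀ (segments : List Int) (spans : List (Int × Int)), Dom_match_segment_spans segments spans → Spec_match_segment_spans segments spans (match_segment_spans segments spans)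

-- ===== LEMMAS AND PROOFS =====

-- span indices (from base j) whose owner entry is `some i`
def emitIdx (i : Nat) : Nat → List (Option Nat) → List Nat
  | _, [] => []
  | j, o :: rest => (if o = some i then [j] else []) ++ emitIdx i (j+1) rest

lemma altInner_spec (i : Nat) : ∀ (os : List (Option Nat)) (j : Nat) (ms mp : List Int),
    altInner i j os (ms, mp)
      = (ms ++ (emitIdx i j os).map (fun _ => (i : Int)),
         mp ++ (emitIdx i j os).map (fun n => (n : Int))) := by
  intro os
  induction os with
  | nil => intro j ms mp; simp [altInner, emitIdx]
  | cons o rest ih =>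
    intro j ms mp
    by_cases h : o = some i <;> simp [altInner, emitIdx, h, ih]

lemma emitIdx_mem (i : Nat) : ∀ (os : List (Option Nat)) (j0 j : Nat),
    j ∈ emitIdx i j0 os ↔ ∃ r, os[r]? = some (some i) ∧ j = j0 + r := by
  intro os
  induction os with
  | nil => intro j0 j; simp [emitIdx]
  | cons o rest ih =>
    intro j0 j
    by_cases h : o = some i
    · subst h
      have e1 : emitIdx i j0 (some i :: rest) = j0 :: emitIdx i (j0+1) rest := by
        simp [emitIdx]
      rw [e1, List.mem_cons, ih]
      constructor
      · rintro (rfl | ⟨r, hr, rfl⟩)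
        · exact ⟨0, by simp, by omega⟩
        · exact ⟨r+1, by simpa using hr, by omega⟩
      · rintro ⟨r, hr, rfl⟩
        cases r with
        | zero => left; omega
        | succ r => right; exact ⟨r, by simpa using hr, by omega⟩
    · have e1 : emitIdx i j0 (o :: rest) = emitIdx i (j0+1) rest := by
        simp [emitIdx, h]
      rw [e1, ih]
      constructor
      · rintro ⟨r, hr, rfl⟩; exact ⟨r+1, by simpa using hr, by omega⟩
      · rintro ⟨r, hr, rfl⟩
        cases r with
        | zero => exact absurd (by simpa using hr) h
        | succ r => exact ⟨r, by simpa using hr, by omega⟩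

lemma ownAux_some (sp : Int × Int) : ∀ (segs : List Int) (c k : Nat),
    ownAux sp c segs = some k →
    ∃ r s', segs[r]? = some s' ∧ k = c + r ∧ sp.1 ≤ s' ∧ s' < sp.2 := by
  intro segs
  induction segs with
  | nil => intro c k h; simp [ownAux] at h
  | cons s rest ih =>
    intro c k h
    by_cases hc : sp.1 ≤ s ∧ s < sp.2
    · simp [ownAux, hc] at h
      exact ⟨0, s, by simp, by omega, hc⟩
    · simp [ownAux, hc] at h
      obtain ⟨r, s', hr, hk, hin⟩ := ih (c+1) k h
      exact ⟨r+1, s', by simpa using hr, by omega, hin⟩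

lemma ownAux_exists (sp : Int × Int) : ∀ (segs : List Int) (c r : Nat) (s' : Int),
    segs[r]? = some s' → sp.1 ≤ s' → s' < sp.2 →
    ∃ k, ownAux sp c segs = some k ∧ k ≤ c + r := by
  intro segs
  induction segs with
  | nil => intro c r s' h; simp at h
  | cons s rest ih =>
    intro c r s' h h1 h2
    by_cases hc : sp.1 ≤ s ∧ s < sp.2
    · exact ⟨c, by simp [ownAux, hc], by omega⟩
    · cases r with
      | zero =>
        simp at h; subst h; exact absurd ⟨h1, h2⟩ hc
      | succ r =>
        obtain ⟨k, hk, hle⟩ := ih (c+1) r s' (by simpa using h) h1 h2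
        exact ⟨k, by simpa [ownAux, hc] using hk, by omega⟩

-- inner loops agree: under the invariant, A's used-list test coincides with "owner = i"
lemma msInner_eq (segments : List Int) (i : Nat) (s : Int)
    (hs : segments[i]? = some s) :
    ∀ (sps : List (Int × Int)) (j0 : Nat) (ms mp : List Int),
    (∀ r sp', sps[r]? = some sp' →
        (((j0 + r : Nat) : Int) ∈ mp ↔ ∃ k, ownAux sp' 0 segments = some k ∧ k < i)) →
    msInnerA i s j0 sps (ms, mp)
      = altInner i j0 (sps.map (fun sp => ownAux sp 0 segments)) (ms, mp) := by
  intro sps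
  induction sps with
  | nil => intro j0 ms mp _; simp [msInnerA, altInner]
  | cons sp rest ih =>
    intro j0 ms mp H
    have H0 := H 0 sp (by simp)
    simp only [Nat.add_zero] at H0
    have key : (¬ ((j0 : Int) ∈ mp) ∧ sp.1 ≤ s ∧ s < sp.2) ↔ ownAux sp 0 segments = some i := by
      constructor
      · rintro ⟨hnm, h1, h2⟩
        obtain ⟨k, hk, hle⟩ := ownAux_exists sp segments 0 i s hs h1 h2
        have : ¬ (k < i) := fun hlt => hnm (H0.mpr ⟨k, hk, hlt⟩)
        have : k = i := by omega
        subst this; exact hk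
      · intro ho
        obtain ⟨r, s', hr, hk, hin1, hin2⟩ := ownAux_some sp segments 0 i ho
        have : r = i := by omega
        subst this
        rw [hs] at hr; cases hr
        refine ⟨fun hm => ?_, hin1, hin2⟩
        obtain ⟨k, hk', hlt⟩ := H0.mp hm
        rw [ho] at hk'; cases hk'; omega
    have Htail : ∀ (mp' : List Int), mp' = mp ∨ mp' = mp ++ [(j0 : Int)] →
        ∀ r sp', rest[r]? = some sp' →
        (((j0 + 1 + r : Nat) : Int) ∈ mp' ↔ ∃ k, ownAux sp' 0 segments = some k ∧ k < i) := by
      rintro mp' (rfl | rfl) r sp' hr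
      · have := H (r+1) sp' (by simpa using hr)
        simpa [show j0 + (r+1) = j0 + 1 + r by omega] using this
      · have := H (r+1) sp' (by simpa using hr)
        rw [show j0 + (r+1) = j0 + 1 + r by omega] at this
        simp only [List.mem_append, List.mem_singleton]
        rw [← this]
        constructor
        · rintro (h | h)
          · exact h
          · exfalso; have : (j0 + 1 + r : Nat) = j0 := by exact_mod_cast h
            omega
        · exact Or.inl
    by_cases hm : (j0 : Int) ∈ mp
    · have hown : ¬ (ownAux sp 0 segments = some i) := fun ho => (key.mpr ho).1 hm
      simp only [msInnerA, altInner, List.map_cons, if_pos hm, if_neg hown]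
      exact ih (j0+1) ms mp (Htail mp (Or.inl rfl))
    · by_cases hc : sp.1 ≤ s ∧ s < sp.2
      · have hown : ownAux sp 0 segments = some i := key.mp ⟨hm, hc⟩
        simp only [msInnerA, altInner, List.map_cons, if_neg hm, if_pos hc, if_pos hown]
        exact ih (j0+1) (ms ++ [(i:Int)]) (mp ++ [(j0:Int)]) (Htail _ (Or.inr rfl))
      · have hown : ¬ (ownAux sp 0 segments = some i) := fun ho => hc (key.mpr ho).2
        simp only [msInnerA, altInner, List.map_cons, if_neg hm, if_neg hc, if_neg hown]
        exact ih (j0+1) ms mp (Htail mp (Or.inl rfl))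

lemma msOuter_eq (segments : List Int) (spans : List (Int × Int)) :
    ∀ (suffix : List Int) (i : Nat) (ms mp : List Int),
    segments.drop i = suffix →
    (∀ r sp', spans[r]? = some sp' →
        (((r : Nat) : Int) ∈ mp ↔ ∃ k, ownAux sp' 0 segments = some k ∧ k < i)) →
    msOuterA i suffix spans (ms, mp)
      = altOuter (spans.map fun sp => ownAux sp 0 segments) suffix.length i (ms, mp) := by
  intro suffix
  induction suffix with
  | nil => intro i ms mp _ _; simp [msOuterA, altOuter]
  | cons s rest ih =>
    intro i ms mp hdrop H
    have hs : segments[i]? = some s := by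
      have h0 : (segments.drop i)[0]? = some s := by rw [hdrop]; rfl
      simpa [List.getElem?_drop] using h0
    have hrest : segments.drop (i+1) = rest := by
      have h0 : List.drop 1 (List.drop i segments) = rest := by rw [hdrop]; rfl
      rwa [List.drop_drop] at h0
    have hinner := msInner_eq segments i s hs spans 0 ms mp
      (by intro r sp' hr; simpa using H r sp' hr)
    have hspec := altInner_spec i (spans.map fun sp => ownAux sp 0 segments) 0 ms mp
    simp only [msOuterA, altOuter, List.length_cons]
    rw [hinner, hspec]
    apply ih (i+1)
    · exact hrest
    · intro r sp' hr
      have hos : (spans.map fun sp => ownAux sp 0 segments)[r]? = some (ownAux sp' 0 segments) := by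
        simp [List.getElem?_map, hr]
      simp only [List.mem_append]
      rw [H r sp' hr]
      have hmem : ((r : Nat) : Int) ∈ (emitIdx i 0 (spans.map fun sp => ownAux sp 0 segments)).map (fun n => (n : Int))
          ↔ ownAux sp' 0 segments = some i := by
        have hcast : ((r : Nat) : Int) ∈ (emitIdx i 0 (spans.map fun sp => ownAux sp 0 segments)).map (fun n => (n : Int))
            ↔ r ∈ emitIdx i 0 (spans.map fun sp => ownAux sp 0 segments) := by
          simp
        rw [hcast, emitIdx_mem]
        constructor
        · rintro ⟨r', hr', hrr⟩
          have : r' = r := by omega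
          subst this
          rw [hos] at hr'; exact (Option.some.injEq _ _).mp hr'
        · intro ho
          exact ⟨r, by rw [hos, ho], by omega⟩
      rw [hmem]
      constructor
      · rintro (⟨k, hk, hlt⟩ | ho)
        · exact ⟨k, hk, by omega⟩
        · exact ⟨i, ho, by omega⟩
      · rintro ⟨k, hk, hlt⟩
        by_cases hki : k = i
        · subst hki; exact Or.inr hk
        · exact Or.inl ⟨k, hk, by omega⟩

-- ===== VERDICT (by name: the statement is the Claim_ definition above) =====
theorem match_segment_spans_spec : Claim_equal_match_segment_spans := by
  unfold Claim_equal_match_segment_spans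
  intro segments spans _
  unfold Spec_match_segment_spans match_segment_spans match_segment_spans_alt
  exact msOuter_eq segments spans segments 0 [] [] List.drop_zero
    (by
      intro r sp' _
      constructor
      · intro h; exact absurd h (List.not_mem_nil)
      · rintro ⟨k, _, hk⟩; omega)
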